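-- pv_equiv track=rewrite | github.com/myza81/systemdisturbances | backend/disturbances/artifacts.py | get_pyramid_level
-- ===== SOURCE A (Python) =====
-- PYRAMID_RATIOS = [1, 2, 4, 8, 16, 32, 64, 128, 256]
--
-- def get_pyramid_level(sample_count: int, target_points: int) -> int:
--     """Determine which pyramid level to use for given sample count and target points.
--
--     Returns pyramid level index (0 = full res, 1 = 1/2, etc.)
--     """
--     if sample_count <= target_points:
--         return 0
--     ratio = sample_count / target_points
--     for i, r in enumerate(PYRAMID_RATIOS):
--         if r >= ratio:
--             return i
--     return len(PYRAMID_RATIOS) - 1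
-- ===== SOURCE B (Python) =====
-- def get_pyramid_level(sample_count: int, target_points: int) -> int:
--     """Closed form: level = clamp(ceil(log2(sample/target)), 0, 8), no scan over PYRAMID_RATIOS."""
--     if sample_count <= target_points:
--         return 0
--     q = -(-sample_count // target_points)  # ceil(sample/target); ZeroDivisionError when target_points == 0, like A
--     if q <= 1:
--         return 0
--     return min(8, (q - 1).bit_length())
-- ===== Notes on version B (the rewrite author's own statement) =====
-- stated objective: alternative
-- what changed: Replaces the linear scan over PYRAMID_RATIOS with a closed form: level = min(8, bit_length(ceil(sample/target) - 1)), computed by integer ceiling division instead of float division and list lookup.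
import Mathlib
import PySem

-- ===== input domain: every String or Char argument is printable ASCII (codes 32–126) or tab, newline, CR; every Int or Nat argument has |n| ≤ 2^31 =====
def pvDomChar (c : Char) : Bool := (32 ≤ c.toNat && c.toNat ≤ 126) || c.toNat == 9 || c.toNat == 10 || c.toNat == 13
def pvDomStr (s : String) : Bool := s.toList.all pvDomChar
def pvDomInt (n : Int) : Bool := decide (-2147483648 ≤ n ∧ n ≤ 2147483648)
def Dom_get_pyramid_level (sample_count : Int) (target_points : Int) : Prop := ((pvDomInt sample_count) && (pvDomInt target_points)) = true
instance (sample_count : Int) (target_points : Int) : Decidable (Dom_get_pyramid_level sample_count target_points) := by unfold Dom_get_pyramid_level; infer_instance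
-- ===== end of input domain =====

-- B replaces A's linear scan over PYRAMID_RATIOS with a closed form (ceiling division + bit_length), same result; objective: alternative/idiomatic.


-- ===== PORT A =====
def PYRAMID_RATIOS : List Int := [1, 2, 4, 8, 16, 32, 64, 128, 256]

-- the 'for i, r in enumerate(PYRAMID_RATIOS): if r >= ratio: return i' loop, with fallthrough len-1.
-- Python's 'ratio = sample_count / target_points' is float division; on Dom (|n| ≤ 2^31) the exact
-- quotient differs from any integer r ∈ {1,…,256} by 0 or by ≥ 2^-31, which exceeds half an ulp of a
-- double near r (≤ 2^-45), so the comparisons 'r >= ratio' coincide with exact rational comparison: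
-- Rat division models them exactly here.
def pyrScanA (ratio : Rat) : List (Int × Int) → Int
  | [] => (PYRAMID_RATIOS.length : Int) - 1
  | (i, r) :: rest => if (r : Rat) ≥ ratio then i else pyrScanA ratio rest

def get_pyramid_level (sample_count : Int) (target_points : Int) : Int :=
  if sample_count ≤ target_points then 0
  else
    let ratio : Rat := (sample_count : Rat) / (target_points : Rat)
    pyrScanA ratio (PySem.List.enumerate PYRAMID_RATIOS)

-- ===== PORT B =====
def get_pyramid_level_alt (sample_count : Int) (target_points : Int) : Int :=
  if sample_count ≤ target_points then 0
  else
    -- q = -(-sample_count // target_points), Python ceiling division (t = 0 excluded by Pre_)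
    let q : Int := -(PySem.Int.floordiv (-sample_count) target_points)
    if q ≤ 1 then 0
    else min 8 ((PySem.Int.bitLength (q - 1) : Int))

-- ===== PRECONDITION & SPEC =====
-- Pre_ excludes exactly the inputs where A raises ZeroDivisionError: target_points = 0 with sample_count > 0.
def Pre_get_pyramid_level (sample_count : Int) (target_points : Int) : Prop :=
  ¬ (target_points = 0 ∧ 0 < sample_count)
instance (sample_count : Int) (target_points : Int) : Decidable (Pre_get_pyramid_level sample_count target_points) := by unfold Pre_get_pyramid_level; infer_instance

def pvWitness_get_pyramid_level : Int × Int := (10, 3)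

def Spec_get_pyramid_level (sample_count : Int) (target_points : Int) (out : Int) : Prop := out = get_pyramid_level_alt sample_count target_points
instance (sample_count : Int) (target_points : Int) (out : Int) : Decidable (Spec_get_pyramid_level sample_count target_points out) := by unfold Spec_get_pyramid_level; infer_instance

-- ===== CLAIM (what is proved, stated in full; the proofs are below) =====
def Claim_equal_get_pyramid_level : Prop := ∀ (sample_count : Int) (target_points : Int), Dom_get_pyramid_level sample_count target_points → Pre_get_pyramid_level sample_count target_points → Spec_get_pyramid_level sample_count target_points (get_pyramid_level sample_count target_points)

-- ===== LEMMAS AND PROOFS =====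

-- for 0 < t: the loop condition 'r >= s/t' is 's ≤ r*t'
lemma ratio_le_iff (s t r : Int) (ht : 0 < t) :
    ((s : Rat) / (t : Rat) ≤ (r : Rat)) ↔ s ≤ r * t := by
  rw [div_le_iff₀ (by exact_mod_cast ht)]
  exact_mod_cast Iff.rfl

-- bit_length bracket: for 1 ≤ n, n < 2^i ↔ bitLength n ≤ i
lemma bitLength_le_iff (n : Int) (hn : n ≠ 0) (i : Nat) :
    PySem.Int.bitLength n ≤ i ↔ n.natAbs < 2 ^ i := by
  constructor
  · intro h
    exact lt_of_lt_of_le (PySem.Int.lt_two_pow_bitLength n) (Nat.pow_le_pow_right (by norm_num) h)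
  · intro h
    by_contra hlt
    have h2 := PySem.Int.two_pow_bitLength_le n hn
    have h3 : 2 ^ i ≤ 2 ^ (PySem.Int.bitLength n - 1) := Nat.pow_le_pow_right (by norm_num) (by omega)
    omega

-- main lemma for the positive-divisor case
lemma pos_case (s t : Int) (ht : 0 < t) (hst : t < s) :
    get_pyramid_level s t = get_pyramid_level_alt s t := by
  have hns : ¬ s ≤ t := by omega
  -- the ceiling q = ⌈s/t⌉ and its bracket
  set q : Int := -(PySem.Int.floordiv (-s) t) with hqdef
  have hq : (q - 1) * t < s ∧ s ≤ q * t :=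
    (PySem.Int.neg_floordiv_neg_eq_iff_of_pos ht).mp hqdef.symm
  have hq2 : 2 ≤ q := by
    by_contra h
    push Not at h
    have : q * t ≤ 1 * t := mul_le_mul_of_nonneg_right (by omega) (by omega)
    omega
  -- each loop condition 's ≤ r*t' is 'q ≤ r' via the bracket
  have hkey : ∀ r : Int, (s ≤ r * t) ↔ q ≤ r := by
    intro r
    constructor
    · intro h
      by_contra hr
      push Not at hr
      have : r * t ≤ (q - 1) * t := mul_le_mul_of_nonneg_right (by omega) (by omega)
      omega
    · intro h
      have : q * t ≤ r * t := mul_le_mul_of_nonneg_right h (by omega)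
      omega
  -- and 'q ≤ 2^i' is 'bitLength (q-1) ≤ i'
  have hbit : ∀ i : Nat, q ≤ 2 ^ (i : Nat) ↔ PySem.Int.bitLength (q - 1) ≤ i := by
    intro i
    rw [bitLength_le_iff (q - 1) (by omega) i]
    have hc : ((2 : Int) ^ i) = ((2 ^ i : Nat) : Int) := by push_cast; ring
    rw [hc]
    omega
  have hcond : ∀ (r : Int) (i : Nat), r = 2 ^ i →
      (((s : Rat) / (t : Rat) ≤ (r : Rat)) ↔ PySem.Int.bitLength (q - 1) ≤ i) := by
    intro r i hr
    rw [ratio_le_iff s t r ht, hkey r, hr, ← hbit i]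
  have hb1 : 1 ≤ PySem.Int.bitLength (q - 1) := by
    by_contra h
    have : q ≤ 2 ^ (0 : Nat) := (hbit 0).mpr (by omega)
    norm_num at this
    omega
  have h0 := hcond 1 0 (by norm_num)
  have h1 := hcond 2 1 (by norm_num)
  have h2 := hcond 4 2 (by norm_num)
  have h3 := hcond 8 3 (by norm_num)
  have h4 := hcond 16 4 (by norm_num)
  have h5 := hcond 32 5 (by norm_num)
  have h6 := hcond 64 6 (by norm_num)
  have h7 := hcond 128 7 (by norm_num)
  have h8 := hcond 256 8 (by norm_num)
  simp only [get_pyramid_level, get_pyramid_level_alt, hns, if_false,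
    PYRAMID_RATIOS, PySem.List.enumerate, pyrScanA, ge_iff_le, ← hqdef]
  rw [if_neg (by omega : ¬ q ≤ 1)]
  push_cast at h0 h1 h2 h3 h4 h5 h6 h7 h8 ⊢
  simp only [h0, h1, h2, h3, h4, h5, h6, h7, h8]
  simp only [List.length_cons, List.length_nil]
  split_ifs <;> omega

-- negative-divisor case: both sides give 0
lemma neg_case (s t : Int) (ht : t < 0) (hst : t < s) :
    get_pyramid_level s t = get_pyramid_level_alt s t := by
  have hns : ¬ s ≤ t := by omega
  have hfd : PySem.Int.floordiv (-s) t = PySem.Int.floordiv s (-t) := by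
    have := PySem.Int.floordiv_neg_neg s (-t)
    simpa using this
  have hge : -1 ≤ PySem.Int.floordiv s (-t) :=
    (PySem.Int.le_floordiv_iff_mul_le (by omega : (0:Int) < -t)).mpr (by omega)
  have hratio : (s : Rat) / (t : Rat) ≤ 1 := by
    rw [div_le_one_of_neg (by exact_mod_cast ht)]
    exact_mod_cast le_of_lt hst
  simp only [get_pyramid_level, get_pyramid_level_alt, hns, if_false,
    PYRAMID_RATIOS, PySem.List.enumerate, pyrScanA, ge_iff_le]
  rw [hfd, if_pos (by omega : -PySem.Int.floordiv s (-t) ≤ 1),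
    if_pos (by exact_mod_cast hratio)]

-- ===== VERDICT (by name: the statement is the Claim_ definition above) =====
theorem get_pyramid_level_spec : Claim_equal_get_pyramid_level := by
  intro s t _ hpre
  unfold Spec_get_pyramid_level Pre_get_pyramid_level at *
  by_cases hle : s ≤ t
  · simp [get_pyramid_level, get_pyramid_level_alt, hle]
  · push Not at hle
    rcases lt_trichotomy t 0 with ht | ht | ht
    · exact neg_case s t ht hle
    · exact absurd ⟨ht, by omega⟩ hpre
    · exact pos_case s t ht hle
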